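-- pv_equiv track=rewrite | github.com/whad-team/whad-client | whad/ble/utils/phy.py | is_access_address_valid
-- ===== SOURCE A (Python) =====
-- def is_access_address_valid(aa):
--     '''
--     This function checks if the provided access address is valid.
--     '''
--     a = (aa & 0xff000000)>>24
--     b = (aa & 0x00ff0000)>>16
--     c = (aa & 0x0000ff00)>>8
--     d = (aa & 0x000000ff)
--     if a==b and b==c and c==d:
--         return False
--     if (aa == 0x8E89BED6):
--         return True
--     bb = aa
--     for i in range(0,26):
--         if (bb & 0x3F) == 0 or (bb & 0x3F) == 0x3F:
--             return False
--         bb >>= 1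
--     bb = aa
--     t = 0
--     a = (bb & 0x80000000)>>31
--     for i in range(30,0,-1):
--         if (bb & (1<<i)) >> i != a:
--             a = (bb & (1<<i))>>i
--             t += 1
--             if t>24:
--                 return False
--         if (i<26) and (t<2):
--             return False
--     return True
-- ===== SOURCE B (Python) =====
-- def is_access_address_valid(aa):
--     s = format(aa & 0xFFFFFFFF, '032b')
--     if s[0:8] == s[8:16] == s[16:24] == s[24:32]:
--         return False
--     if aa == 0x8E89BED6:
--         return True
--     low = s[1:]
--     if '000000' in low or '111111' in low:
--         return False
--     trans = [x != y for x, y in zip(s, s[1:])]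
--     return sum(trans[:6]) >= 2 and sum(trans[:30]) <= 24
-- ===== Notes on version B (the rewrite author's own statement) =====
-- stated objective: idiomatic
-- what changed: A's shift-and-mask loops are replaced by a string-of-bits representation: the address is formatted once as its binary string, the equal-bytes test compares four byte-sized slices, the six-bit-run window scan becomes a substring search for all-zero/all-one runs in the low characters, and the stateful early-exit transition loop becomes two sums over adjacent character pairs compared against the original thresholds.
import Mathlib
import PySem

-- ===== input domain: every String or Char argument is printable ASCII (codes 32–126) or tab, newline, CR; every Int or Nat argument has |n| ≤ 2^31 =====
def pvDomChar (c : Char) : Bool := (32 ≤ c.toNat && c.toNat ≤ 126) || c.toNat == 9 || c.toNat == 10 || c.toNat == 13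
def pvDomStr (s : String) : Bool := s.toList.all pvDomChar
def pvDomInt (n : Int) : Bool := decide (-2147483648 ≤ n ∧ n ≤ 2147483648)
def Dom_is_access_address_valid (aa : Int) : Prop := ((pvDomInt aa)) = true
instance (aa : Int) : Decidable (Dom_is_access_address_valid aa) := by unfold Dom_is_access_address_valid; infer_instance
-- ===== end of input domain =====

-- B re-reads the address through its 32-character binary representation: the byte test
-- compares four 8-character slices, the six-bit-run test becomes a substring search, and
-- the transition rule becomes two sums over adjacent character pairs (objective: idiomatic).

-- ===== PORT A =====
-- the first loop of A: 26 rounds, bb is shifted right once per round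
def pvAwin (bb : Int) : Nat → Bool
  | 0 => true
  | n+1 =>
    if PySem.Int.band bb 63 = 0 ∨ PySem.Int.band bb 63 = 63 then false
    else pvAwin (bb >>> (1:Nat)) n

-- the second loop of A: i runs 30,29,…,1 (the Nat argument is the current i)
def pvAtr (bb a t : Int) : Nat → Bool
  | 0 => true
  | i+1 =>
    if (PySem.Int.band bb ((1:Int) <<< (i+1))) >>> (i+1) ≠ a then
      if t + 1 > 24 then false
      else if i+1 < 26 ∧ t+1 < 2 then false
      else pvAtr bb ((PySem.Int.band bb ((1:Int) <<< (i+1))) >>> (i+1)) (t+1) i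
    else if i+1 < 26 ∧ t < 2 then false
    else pvAtr bb a t i

def is_access_address_valid (aa : Int) : Bool :=
  let a := (PySem.Int.band aa 0xff000000) >>> (24:Nat)
  let b := (PySem.Int.band aa 0x00ff0000) >>> (16:Nat)
  let c := (PySem.Int.band aa 0x0000ff00) >>> (8:Nat)
  let d := PySem.Int.band aa 0x000000ff
  if a = b ∧ b = c ∧ c = d then false
  else if aa = 0x8E89BED6 then true
  else if pvAwin aa 26 then
    pvAtr aa ((PySem.Int.band aa 0x80000000) >>> (31:Nat)) 0 30
  else false

-- ===== PORT B =====
-- hand port of format(v, '032b'): the 32 binary digits of v, MSB first; exact for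
-- 0 ≤ v < 2^32, which holds for every 'aa & 0xFFFFFFFF' that B applies it to
def pvFmt032b (v : Int) : List Char :=
  (List.range 32).map (fun k => if v / 2^(31-k) % 2 = 1 then '1' else '0')

def is_access_address_valid_alt (aa : Int) : Bool :=
  let s := pvFmt032b (PySem.Int.band aa 4294967295)
  if PySem.List.slice s (some 0) (some 8) = PySem.List.slice s (some 8) (some 16) ∧
     PySem.List.slice s (some 8) (some 16) = PySem.List.slice s (some 16) (some 24) ∧
     PySem.List.slice s (some 16) (some 24) = PySem.List.slice s (some 24) (some 32) then false
  else if aa = 0x8E89BED6 then true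
  else
    let low := PySem.List.slice s (some 1) none
    if PySem.Chars.isIn ['0','0','0','0','0','0'] low ||
       PySem.Chars.isIn ['1','1','1','1','1','1'] low then false
    else
      -- trans = [x != y for x, y in zip(s, s[1:])]; sum(bools) counts the Trues
      let trans := (s.zip (PySem.List.slice s (some 1) none)).map (fun p => decide (p.1 ≠ p.2))
      decide (2 ≤ (((PySem.List.slice trans (some 0) (some 6)).countP id : Nat) : Int)) &&
      decide ((((PySem.List.slice trans (some 0) (some 30)).countP id : Nat) : Int) ≤ 24)

-- ===== PRECONDITION & SPEC =====
def Spec_is_access_address_valid (aa : Int) (out : Bool) : Prop := out = is_access_address_valid_alt aa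
instance (aa : Int) (out : Bool) : Decidable (Spec_is_access_address_valid aa out) := by unfold Spec_is_access_address_valid; infer_instance

-- ===== CLAIM (what is proved, stated in full; the proofs are below) =====
def Claim_equal_is_access_address_valid : Prop := ∀ (aa : Int), Dom_is_access_address_valid aa → Spec_is_access_address_valid aa (is_access_address_valid aa)

-- ===== LEMMAS AND PROOFS =====

-- bit j of aa, as A's loops read it
def pvBit (aa : Int) (i : Nat) : Int := PySem.Int.band (aa >>> i) 1

-- extracting bit i: masking with 1<<i then shifting equals shifting then masking with 1
theorem pv_bitExtract (x : Int) (i : Nat) :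
    (PySem.Int.band x ((1:Int) <<< i)) >>> i = PySem.Int.band (x >>> i) 1 := by
  have hp : (0:Int) < 2^i := by positivity
  have hpn : (0:Nat) < 2^i := by positivity
  have hpt : ((2:Int)^i).toNat = 2^i := by exact Nat.add_zero (NatPow.pow 2 i)
  rw [PySem.Int.band_one, PySem.Int.mod_eq_emod_of_pos (by norm_num),
      Int.shiftLeft_eq, one_mul, Int.shiftRight_eq_div_pow, Int.shiftRight_eq_div_pow]
  unfold PySem.Int.band
  by_cases hx : 0 ≤ x
  · simp only [hx, if_true, le_of_lt hp, if_true, hpt]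
    rw [Nat.and_two_pow, Nat.testBit_eq_decide_div_mod_eq]
    obtain ⟨n, rfl⟩ : ∃ n : Nat, x = (n:Int) := ⟨x.toNat, (Int.toNat_of_nonneg hx).symm⟩
    rw [Int.toNat_natCast, ← Int.natCast_ediv, ← Int.natCast_ediv,
        show (2:Int) = ((2:Nat):Int) from rfl, ← Int.natCast_emod]
    have : ((decide (n / 2 ^ i % 2 = 1)).toNat * 2 ^ i) / 2^i = (n / 2^i) % 2 := by
      rw [Nat.mul_div_cancel _ hpn]
      by_cases h : n / 2 ^ i % 2 = 1 <;> simp [h] <;> omega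
    exact_mod_cast this
  · simp only [hx, if_false, le_of_lt hp, if_true, hpt]
    obtain ⟨n, rfl⟩ : ∃ n : Nat, x = -(n:Int) - 1 :=
      ⟨(-x-1).toNat, by rw [Int.toNat_of_nonneg (by omega)]; ring⟩
    have hnn : (-(-(n:Int) - 1) - 1).toNat = n := by omega
    rw [hnn, Nat.land_comm, Nat.and_two_pow, Nat.testBit_eq_decide_div_mod_eq]
    set q := n / 2^i with hq
    have hdecomp : n = 2^i * q + n % 2^i := (Nat.div_add_mod n (2^i)).symm
    have hrlt : n % 2^i < 2^i := Nat.mod_lt _ hpn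
    have hd : (n:Int) = ((2^i : Nat) : Int) * q + ((n % 2^i : Nat) : Int) := by
      exact_mod_cast hdecomp
    have hrlt' : ((n % 2^i : Nat) : Int) < ((2^i : Nat) : Int) := by exact_mod_cast hrlt
    have hPpos : (0:Int) < ((2^i : Nat) : Int) := by exact_mod_cast hpn
    have hdiv : (-(n:Int) - 1) / (((2:Nat)^i : Nat) : Int) = -((q:Int)+1) := by
      have hsplit : (-(n:Int) - 1) =
          (((2^i : Nat) : Int) - ((n % 2^i : Nat) : Int) - 1) + (-(q:Int)-1) * ((2^i : Nat) : Int) := by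
        rw [hd]; ring
      rw [hsplit, Int.add_mul_ediv_right _ _ (by omega : ((2^i : Nat) : Int) ≠ 0),
          Int.ediv_eq_zero_of_lt (by omega) (by omega)]
      ring
    rw [hdiv]
    by_cases h : q % 2 = 1
    · simp only [h, decide_true, Bool.toNat_true, one_mul, Nat.sub_self]
      rw [Nat.cast_zero, Int.zero_ediv]
      omega
    · simp only [h, decide_false, Bool.toNat_false, zero_mul, Nat.sub_zero]
      rw [Int.ediv_self (by exact_mod_cast hpn.ne')]
      omega

-- the Nat core of the chunk-mask identity
theorem pv_nat_chunk (v s k : Nat) : v &&& (2^(s+k) - 2^s) = v % 2^(s+k) - v % 2^s := by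
  have hM : 2^(s+k) - 2^s = (2^k - 1) * 2^s := by
    rw [Nat.sub_mul, one_mul, ← pow_add, Nat.add_comm k s]
  have hmm : v % 2^(s+k) % 2^s = v % 2^s := Nat.mod_mod_of_dvd v (pow_dvd_pow 2 (by omega))
  set w := v % 2^(s+k) with hwdef
  have hdm := Nat.div_add_mod w (2^s)
  have hkey : v &&& (2^(s+k) - 2^s) = (w / 2^s) * 2^s := by
    apply Nat.eq_of_testBit_eq
    intro j
    rw [Nat.testBit_and, hM, Nat.testBit_mul_two_pow, Nat.testBit_mul_two_pow,
        Nat.testBit_div_two_pow, hwdef, Nat.testBit_mod_two_pow]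
    by_cases hsj : s ≤ j
    · simp only [hsj, decide_true, Bool.true_and]
      rw [Nat.sub_add_cancel hsj, Nat.testBit_two_pow_sub_one]
      by_cases hv : v.testBit j
      · simp only [hv, Bool.and_true, Bool.true_and]
        by_cases h2 : j - s < k
        · simp only [show j < s + k from by omega, h2, decide_true]
        · simp only [show ¬ (j < s + k) from by omega, h2, decide_false]
      · simp [hv]
    · simp [hsj]
  have hcomm : (w/2^s)*2^s = 2^s*(w/2^s) := Nat.mul_comm _ _
  omega

theorem pv_neg_emod (w t : Nat) :
    (-(w:Int) - 1) % (2:Int)^t = (2:Int)^t - 1 - ((w % 2^t : Nat) : Int) := by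
  have hc : (2:Int)^t = ((2^t : Nat) : Int) := by push_cast; ring
  have hPn : (0:Nat) < 2^t := by positivity
  have hr : w % 2^t < 2^t := Nat.mod_lt _ hPn
  have hdm := Nat.div_add_mod w (2^t)
  set q := w / 2^t
  set r := w % 2^t
  have hsplit : (-(w:Int) - 1) = (((2^t : Nat) : Int) - 1 - r) + (-(q:Int)-1) * ((2^t : Nat) : Int) := by
    have hw : (w:Int) = ((2^t : Nat) : Int) * q + r := by exact_mod_cast hdm.symm
    rw [hw]; ring
  rw [hc, hsplit, Int.add_mul_emod_self_right, Int.emod_eq_of_lt (by omega) (by omega)]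

theorem pv_band_chunk (x : Int) (s k : Nat) :
    PySem.Int.band x (((2^(s+k) - 2^s : Nat) : Int)) = x % 2^(s+k) - x % 2^s := by
  by_cases hx : 0 ≤ x
  · obtain ⟨v, rfl⟩ : ∃ v : Nat, x = (v:Int) := ⟨x.toNat, (Int.toNat_of_nonneg hx).symm⟩
    rw [PySem.Int.band_natCast, pv_nat_chunk]
    have hle : v % 2^s ≤ v % 2^(s+k) := by
      have := Nat.mod_mod_of_dvd v (pow_dvd_pow 2 (by omega : s ≤ s + k))
      have := Nat.mod_le (v % 2^(s+k)) (2^s)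
      omega
    push_cast [Nat.cast_sub hle]
    ring
  · obtain ⟨w, rfl⟩ : ∃ w : Nat, x = -(w:Int) - 1 :=
      ⟨(-x-1).toNat, by rw [Int.toNat_of_nonneg (by omega)]; ring⟩
    have hband : PySem.Int.band (-(w:Int) - 1) (((2^(s+k) - 2^s : Nat) : Int)) =
        (((2^(s+k) - 2^s : Nat) - ((2^(s+k) - 2^s : Nat) &&& w) : Nat) : Int) := by
      unfold PySem.Int.band
      rw [if_neg (by omega), if_pos (by positivity),
          show (-(-(w:Int) - 1) - 1) = (w:Int) by ring, Int.toNat_natCast, Int.toNat_natCast]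
    rw [hband, pv_neg_emod, pv_neg_emod,
        show (2^(s+k) - 2^s) &&& w = w &&& (2^(s+k) - 2^s) from Nat.and_comm _ _,
        pv_nat_chunk w s k]
    have hle : w % 2^s ≤ w % 2^(s+k) := by
      have := Nat.mod_mod_of_dvd w (pow_dvd_pow 2 (by omega : s ≤ s + k))
      have := Nat.mod_le (w % 2^(s+k)) (2^s)
      omega
    have hps : (2:Nat)^s ≤ 2^(s+k) := Nat.pow_le_pow_right (by omega) (by omega)
    have h1 : w % 2^(s+k) < 2^(s+k) := Nat.mod_lt _ (by positivity)
    have hc : ((2:Int))^(s+k) = ((2^(s+k) : Nat) : Int) := by push_cast; ring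
    have hc2 : ((2:Int))^s = ((2^s : Nat) : Int) := by push_cast; ring
    have hAB : w % 2^(s+k) - w % 2^s ≤ 2^(s+k) - 2^s := by
      rw [← pv_nat_chunk w s k]
      exact Nat.and_le_right
    rw [hc, hc2]
    set A := w % 2^(s+k) with hA
    set B := w % 2^s with hB
    set P2 := (2:Nat)^(s+k) with hP2
    set P1 := (2:Nat)^s with hP1
    omega

theorem pv_chunk_div (x : Int) (s k : Nat) :
    (x % 2^(s+k) - x % 2^s) / 2^s = (x / 2^s) % 2^k := by
  have hs : (0:Int) < 2^s := by positivity
  have hk : (0:Int) < 2^k := by positivity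
  have hsk : (0:Int) < 2^(s+k) := by positivity
  set r := x % 2^(s+k) with hrdef
  have hr0 : 0 ≤ r := Int.emod_nonneg x (by omega)
  have hr1 : r < 2^(s+k) := Int.emod_lt_of_pos x hsk
  have hmm : x % 2^s = r % 2^s := (Int.emod_emod_of_dvd x (pow_dvd_pow 2 (by omega))).symm
  have hed := Int.emod_add_mul_ediv r ((2:Int)^s)
  have hL : (r - r % 2^s) = 2^s * (r / 2^s) := by omega
  rw [hmm, hL, Int.mul_ediv_cancel_left _ (by omega)]
  have hx : (2:Int)^(s+k) * (x / 2^(s+k)) + r = x := by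
    have := Int.emod_add_mul_ediv x ((2:Int)^(s+k))
    omega
  have hpow : (2:Int)^(s+k) = 2^s * 2^k := by rw [pow_add]
  have hxeq : x = r + 2^k * (x / 2^(s+k)) * 2^s := by
    linear_combination (-1) * hx + (x / 2^(s+k)) * hpow
  have hdiv : x / 2^s = r / 2^s + 2^k * (x / 2^(s+k)) := by
    conv_lhs => rw [hxeq]
    exact Int.add_mul_ediv_right _ _ (by omega)
  rw [hdiv]
  have hq0 : 0 ≤ r / 2^s := Int.ediv_nonneg hr0 (by omega)
  have hq1 : r / 2^s < 2^k := by
    rw [Int.ediv_lt_iff_lt_mul hs]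
    calc r < 2^(s+k) := hr1
      _ = 2^k * 2^s := by rw [pow_add]; ring
  rw [Int.add_mul_emod_self_left, Int.emod_eq_of_lt hq0 hq1]

-- split off the low bit of a mod by 2^(k+1)
theorem pv_mod_split (k : Nat) (y : Int) :
    y % 2^(k+1) = y % 2 + 2 * (y / 2 % 2^k) := by
  have h2 : (0:Int) < 2 := by norm_num
  have hk : (0:Int) < 2^k := by positivity
  have e1 : (2:Int) * (y / 2) + y % 2 = y := by
    have := Int.emod_add_mul_ediv y (2:Int)
    omega
  have e2 : (2:Int)^k * (y / 2 / 2^k) + y / 2 % 2^k = y / 2 := by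
    have := Int.emod_add_mul_ediv (y/2) ((2:Int)^k)
    omega
  have hy : y = (y % 2 + 2 * (y / 2 % 2^k)) + (y / 2 / 2^k) * 2^(k+1) := by
    rw [pow_succ]
    linear_combination (-1) * e1 - 2 * e2
  have hb1 : 0 ≤ y % 2 := Int.emod_nonneg y (by omega)
  have hb2 : y % 2 < 2 := Int.emod_lt_of_pos y h2
  have hb3 : 0 ≤ y / 2 % 2^k := Int.emod_nonneg _ (by omega)
  have hb4 : y / 2 % 2^k < 2^k := Int.emod_lt_of_pos _ hk
  conv_lhs => rw [hy]
  rw [Int.add_mul_emod_self_right, Int.emod_eq_of_lt (by omega) (by rw [pow_succ]; omega)]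

theorem pv_mod_eq_iff_bits (k : Nat) : ∀ (y z : Int),
    y % 2^k = z % 2^k ↔ ∀ j, j < k → y / 2^j % 2 = z / 2^j % 2 := by
  induction k with
  | zero =>
    intro y z
    simp [Int.emod_one]
  | succ k ih =>
    intro y z
    rw [pv_mod_split, pv_mod_split]
    constructor
    · intro h j hj
      have hb1 : 0 ≤ y % 2 := Int.emod_nonneg y (by omega)
      have hb2 : y % 2 < 2 := Int.emod_lt_of_pos y (by omega)
      have hb3 : 0 ≤ z % 2 := Int.emod_nonneg z (by omega)
      have hb4 : z % 2 < 2 := Int.emod_lt_of_pos z (by omega)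
      have h0 : y % 2 = z % 2 ∧ y / 2 % 2^k = z / 2 % 2^k := by omega
      match j with
      | 0 => simpa using h0.1
      | j+1 =>
        have := (ih (y/2) (z/2)).1 h0.2 j (by omega)
        rw [pow_succ, mul_comm, ← Int.ediv_ediv_eq_ediv_mul (by omega),
            ← Int.ediv_ediv_eq_ediv_mul (by omega)]
        exact this
    · intro h
      have h0 : y % 2 = z % 2 := by simpa using h 0 (by omega)
      have h1 : y / 2 % 2^k = z / 2 % 2^k := by
        apply (ih (y/2) (z/2)).2
        intro j hj
        have := h (j+1) (by omega)
        rw [pow_succ, mul_comm, ← Int.ediv_ediv_eq_ediv_mul (by omega),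
            ← Int.ediv_ediv_eq_ediv_mul (by omega)] at this
        exact this
      rw [h0, h1]


theorem pv_ediv_pow_ediv_pow (x : Int) (a b : Nat) : x / 2^a / 2^b = x / 2^(a+b) := by
  rw [Int.ediv_ediv_eq_ediv_mul (by positivity), ← pow_add]

-- A's single-bit reads are the arithmetic bits
theorem pvBit_eq (aa : Int) (j : Nat) : pvBit aa j = aa / 2^j % 2 := by
  unfold pvBit
  rw [PySem.Int.band_one, PySem.Int.mod_eq_emod_of_pos (by norm_num),
      Int.shiftRight_eq_div_pow]
  norm_num

-- bits below 32 pass through the 0xFFFFFFFF mask unchanged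
theorem pv_masked_bit (aa : Int) (j : Nat) (hj : j < 32) :
    PySem.Int.band aa 4294967295 / 2^j % 2 = aa / 2^j % 2 := by
  have hmask : PySem.Int.band aa 4294967295 = aa % 2^32 := by
    have h := pv_band_chunk aa 0 32
    norm_num [Int.emod_one] at h
    exact h
  rw [hmask]
  have hj2 : (0:Int) < 2^j := by positivity
  set q := aa / 2^32 with hq
  have hx : (2:Int)^32 * q + aa % 2^32 = aa := by
    have := Int.emod_add_mul_ediv aa ((2:Int)^32)
    omega
  have hpow : (2:Int)^32 = 2^(31-j) * 2 * 2^j := by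
    rw [mul_assoc, ← pow_succ', ← pow_add]
    congr 1
    omega
  have hdiv : aa / 2^j = aa % 2^32 / 2^j + 2^(31-j) * 2 * q := by
    conv_lhs => rw [show aa = aa % 2^32 + (2^(31-j) * 2 * q) * 2^j by
      linear_combination (-1) * hx + q * hpow]
    exact Int.add_mul_ediv_right _ _ (by omega)
  rw [hdiv, show aa % 2^32 / 2^j + 2^(31-j) * 2 * q = aa % 2^32 / 2^j + (2^(31-j) * q) * 2 by ring,
      Int.add_mul_emod_self_right]

-- ======= everything below reduces both ports to statements about 'aa / 2^j % 2' =======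

-- A's first loop is the negation of an 'any' over the 26 windows
theorem pv_win_eq : ∀ (n : Nat) (b : Int), pvAwin b n =
    !((List.range n).any fun k =>
      decide (PySem.Int.band (b >>> k) 63 = 0) || decide (PySem.Int.band (b >>> k) 63 = 63)) := by
  intro n
  induction n with
  | zero => intro b; simp [pvAwin]
  | succ n ih =>
    intro b
    rw [List.range_succ_eq_map]
    by_cases h : PySem.Int.band b 63 = 0 ∨ PySem.Int.band b 63 = 63
    · rcases h with h | h <;> simp [pvAwin, h, Int.shiftRight_zero]
    · rw [not_or] at h
      rw [show pvAwin b (n+1) = pvAwin (b >>> (1:Nat)) n from by simp [pvAwin, h.1, h.2], ih (b >>> (1:Nat))]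
      simp only [List.any_cons, List.any_map, Function.comp_def, Int.shiftRight_zero,
        h.1, h.2, decide_false, Bool.or_false, Bool.false_or]
      congr 2
      funext k
      rw [Nat.succ_eq_add_one, Nat.add_comm k 1, Int.shiftRight_add]

-- transition counter: number of adjacent-bit changes at positions lo, lo+1, …, lo+n-1
def pvCnt (aa : Int) (lo : Nat) : Nat → Int
  | 0 => 0
  | n+1 => pvCnt aa lo n + (if pvBit aa (lo+n) ≠ pvBit aa (lo+n+1) then 1 else 0)

theorem pvCnt_nonneg (aa : Int) (lo : Nat) : ∀ n, 0 ≤ pvCnt aa lo n := by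
  intro n
  induction n with
  | zero => simp [pvCnt]
  | succ n ih => unfold pvCnt; split <;> omega

theorem pvCnt_split (aa : Int) (lo m : Nat) : ∀ n, pvCnt aa lo (m+n) = pvCnt aa lo m + pvCnt aa (lo+m) n := by
  intro n
  induction n with
  | zero => simp [pvCnt]
  | succ n ih =>
    have h1 : m + (n+1) = (m+n)+1 := rfl
    rw [h1]
    show pvCnt aa lo (m+n) + _ = _
    rw [ih, show lo + (m+n) = lo + m + n by omega]
    show _ = pvCnt aa lo m + (pvCnt aa (lo+m) n + _)
    ring

-- closed form of A's second loop entered at counter i with accumulated count t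
def pvOK (aa : Int) (t : Int) (i : Nat) : Bool :=
  (List.range i).all fun k =>
    (!(decide (pvBit aa (k+1) ≠ pvBit aa (k+2))) || decide (t + pvCnt aa (k+1) (i-k) ≤ 24)) &&
    (decide (25 < k+1) || decide (2 ≤ t + pvCnt aa (k+1) (i-k)))

theorem pv_all_range_congr (i : Nat) (p q : Nat → Bool) (h : ∀ k, k < i → p k = q k) :
    (List.range i).all p = (List.range i).all q := by
  rw [Bool.eq_iff_iff]
  simp only [List.all_eq_true, List.mem_range]
  constructor
  · intro H k hk; rw [← h k hk]; exact H k hk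
  · intro H k hk; rw [h k hk]; exact H k hk

theorem pvOK_succ (aa : Int) (t : Int) (i : Nat) :
    pvOK aa t (i+1) =
      (pvOK aa (t + pvCnt aa (i+1) 1) i &&
       ((!(decide (pvBit aa (i+1) ≠ pvBit aa (i+2))) || decide (t + pvCnt aa (i+1) 1 ≤ 24)) &&
        (decide (25 < i+1) || decide (2 ≤ t + pvCnt aa (i+1) 1)))) := by
  unfold pvOK
  rw [List.range_succ, List.all_append]
  simp only [List.all_cons, List.all_nil, Bool.and_true]
  rw [show i+1-i = 1 from by omega]
  congr 1
  apply pv_all_range_congr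
  intro k hk
  have h1 : pvCnt aa (k+1) (i+1-k) = pvCnt aa (k+1) (i-k) + pvCnt aa (i+1) 1 := by
    rw [show i+1-k = (i-k)+1 from by omega, pvCnt_split aa (k+1) (i-k) 1,
        show k+1+(i-k) = i+1 from by omega]
  rw [h1, show t + (pvCnt aa (k+1) (i-k) + pvCnt aa (i+1) 1)
        = t + pvCnt aa (i+1) 1 + pvCnt aa (k+1) (i-k) from by ring]

theorem pv_tr_eq (aa : Int) : ∀ (i : Nat) (t : Int),
    pvAtr aa (pvBit aa (i+1)) t i = pvOK aa t i := by
  intro i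
  induction i with
  | zero => intro t; simp [pvAtr, pvOK]
  | succ i ih =>
    intro t
    rw [pvOK_succ]
    have hδ : pvCnt aa (i+1) 1 = (if pvBit aa (i+1) ≠ pvBit aa (i+2) then (1:Int) else 0) := by
      simp [pvCnt]
    show pvAtr aa (pvBit aa (i+2)) t (i+1) = _
    unfold pvAtr
    have hfold : ∀ j : Nat, (PySem.Int.band aa ((1:Int) <<< j)) >>> j = pvBit aa j :=
      fun j => pv_bitExtract aa j
    rw [hfold (i+1), hδ]
    by_cases h : pvBit aa (i+1) = pvBit aa (i+2)
    · have hA : pvAtr aa (pvBit aa (i+2)) t i = pvOK aa t i := by rw [← h]; exact ih t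
      by_cases h2 : i+1 < 26 ∧ t < 2
      · have e1 : ¬ 25 < i+1 := by omega
        have e2 : ¬ 2 ≤ t := by omega
        simp [h, h2, e1, e2]
      · simp [h, hA]
        rcases (by omega : ¬(i+1 < 26) ∨ 2 ≤ t) with e | e
        · simp [e, show 25 ≤ i from by omega]
        · simp [show ¬(t ≤ 1) from by omega, e]
    · by_cases h24 : t + 1 > 24
      · have e1 : ¬ (t + 1 ≤ 24) := by omega
        simp [h, h24, e1]
      · by_cases h2 : i+1 < 26 ∧ t+1 < 2
        · have e1 : ¬ 25 < i+1 := by omega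
          have e2 : ¬ 2 ≤ t + 1 := by omega
          simp [h, h24, h2, e1, e2]
        · simp [h, h24, ih (t+1)]
          have ht : decide (t < 24) = true := by simp; omega
          rcases (by omega : ¬(i+1 < 26) ∨ 2 ≤ t + 1) with e | e
          · simp [ht, e, show 25 ≤ i from by omega]
          · simp [ht, show ¬(t ≤ 0) from by omega, e]

theorem pv_ivt (aa : Int) : ∀ m : Nat, m ≤ 30 → pvCnt aa (31-m) m ≤ 24 ∨
    ∃ k, k < 30 ∧ pvBit aa (k+1) ≠ pvBit aa (k+2) ∧ ¬(pvCnt aa (k+1) (30-k) ≤ 24) := by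
  intro m
  induction m with
  | zero => intro _; left; simp [pvCnt]
  | succ m ihm =>
    intro hm
    rcases ihm (by omega) with hle | hw
    · have hsplit : pvCnt aa (30-m) (m+1) = pvCnt aa (30-m) 1 + pvCnt aa (31-m) m := by
        rw [show m+1 = 1+m from by omega, pvCnt_split aa (30-m) 1 m,
            show 30-m+1 = 31-m from by omega]
      by_cases hx : pvCnt aa (30-m) (m+1) ≤ 24
      · left
        rw [show 31-(m+1) = 30-m from by omega]
        exact hx
      · right
        have h1 : pvCnt aa (30-m) 1 =
            (if pvBit aa (30-m) ≠ pvBit aa (30-m+1) then (1:Int) else 0) := by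
          simp [pvCnt]
        refine ⟨29-m, by omega, ?_, ?_⟩
        · rw [show 29-m+1 = 30-m from by omega, show 29-m+2 = 30-m+1 from by omega]
          intro hc
          rw [h1, if_neg (fun hd => hd hc)] at hsplit
          omega
        · rw [show 29-m+1 = 30-m from by omega, show 30-(29-m) = m+1 from by omega]
          exact hx
    · right; exact hw

theorem pv_ok_final (aa : Int) :
    pvOK aa 0 30 = (decide (2 ≤ pvCnt aa 25 6) && decide (pvCnt aa 1 30 ≤ 24)) := by
  rw [Bool.eq_iff_iff]
  simp only [pvOK, List.all_eq_true, List.mem_range, Bool.and_eq_true, Bool.or_eq_true,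
    Bool.not_eq_true', decide_eq_true_eq, decide_eq_false_iff_not]
  constructor
  · intro H
    constructor
    · have h24 := (H 24 (by omega)).2
      rcases h24 with h | h
      · omega
      · norm_num at h
        omega
    · rcases pv_ivt aa 30 (le_refl 30) with h | ⟨k, hk, htr, hgt⟩
      · norm_num at h
        omega
      · exfalso
        rcases (H k hk).1 with hnot | hle
        · exact hnot htr
        · omega
  · rintro ⟨hh, ht⟩ k hk
    constructor
    · right
      have hs := pvCnt_split aa 1 k (30-k)
      rw [show k+(30-k) = 30 from by omega, show 1+k = k+1 from by omega] at hs
      have hnn := pvCnt_nonneg aa 1 k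
      omega
    · by_cases h25 : 25 < k+1
      · left; exact h25
      · right
        have hs := pvCnt_split aa (k+1) (24-k) 6
        rw [show (24-k)+6 = 30-k from by omega, show k+1+(24-k) = 25 from by omega] at hs
        have hnn := pvCnt_nonneg aa (k+1) (24-k)
        omega

-- ===== bridge: B's character string, read bit by bit =====

-- the character function behind B's bit string
def pvG (aa : Int) (k : Nat) : Char := if aa / 2^(31-k) % 2 = 1 then '1' else '0'

theorem pv_s_eq (aa : Int) :
    pvFmt032b (PySem.Int.band aa 4294967295) = (List.range 32).map (pvG aa) := by
  unfold pvFmt032b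
  apply List.map_congr_left
  intro k hk
  rw [List.mem_range] at hk
  unfold pvG
  rw [pv_masked_bit aa (31-k) (by omega)]

theorem pv_g_eq_iff (aa : Int) (p q : Nat) :
    pvG aa p = pvG aa q ↔ aa / 2^(31-p) % 2 = aa / 2^(31-q) % 2 := by
  have h1 : 0 ≤ aa / 2^(31-p) % 2 := Int.emod_nonneg _ (by norm_num)
  have h2 : aa / 2^(31-p) % 2 < 2 := Int.emod_lt_of_pos _ (by norm_num)
  have h3 : 0 ≤ aa / 2^(31-q) % 2 := Int.emod_nonneg _ (by norm_num)
  have h4 : aa / 2^(31-q) % 2 < 2 := Int.emod_lt_of_pos _ (by norm_num)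
  unfold pvG
  split_ifs with hp hq hq
  · exact iff_of_true rfl (by omega)
  · exact iff_of_false (by decide) (by omega)
  · exact iff_of_false (by decide) (by omega)
  · exact iff_of_true rfl (by omega)

theorem pv_g_zero_iff (aa : Int) (p : Nat) : pvG aa p = '0' ↔ aa / 2^(31-p) % 2 = 0 := by
  have h1 : 0 ≤ aa / 2^(31-p) % 2 := Int.emod_nonneg _ (by norm_num)
  have h2 : aa / 2^(31-p) % 2 < 2 := Int.emod_lt_of_pos _ (by norm_num)
  unfold pvG
  split_ifs with hp
  · exact iff_of_false (by decide) (by omega)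
  · exact iff_of_true rfl (by omega)

theorem pv_g_one_iff (aa : Int) (p : Nat) : pvG aa p = '1' ↔ aa / 2^(31-p) % 2 = 1 := by
  unfold pvG
  split_ifs with hp
  · exact iff_of_true rfl hp
  · exact iff_of_false (by decide) hp

theorem pv_chunk_take {α : Type} (f : Nat → α) (n d t : Nat) (h : d + t ≤ n) :
    (((List.range n).map f).drop d).take t = (List.range t).map (fun j => f (d+j)) := by
  apply List.ext_getElem
  · simp
    omega
  · intro i h1 h2
    simp only [List.getElem_take, List.getElem_drop, List.getElem_map, List.getElem_range]

theorem pv_band_shift (x : Int) (s k : Nat) :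
    (PySem.Int.band x (((2^(s+k) - 2^s : Nat) : Int))) >>> s = x / 2^s % 2^k := by
  rw [pv_band_chunk, Int.shiftRight_eq_div_pow,
      show (((2^s : Nat) : Int)) = (2:Int)^s from by push_cast; ring, pv_chunk_div]

theorem pv_neg_one_ediv (u : Nat) : (-1:Int) / 2^u = -1 := by
  have h := pv_neg_emod 0 u
  norm_num at h
  have h2 := Int.emod_add_mul_ediv (-1 : Int) ((2:Int)^u)
  have hA : (2:Int)^u * ((-1:Int)/2^u) = 2^u * (-1) := by omega
  exact mul_left_cancel₀ (by positivity : ((2:Int)^u) ≠ 0) hA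

theorem pv_countP_range_reflect (p q : Nat → Bool) (n : Nat)
    (h : ∀ k, k < n → p k = q (n-1-k)) :
    (List.range n).countP p = (List.range n).countP q := by
  have h1 : (List.range n).countP p = (List.range n).countP (fun k => q (n-1-k)) := by
    apply List.countP_congr
    intro x hx
    rw [List.mem_range] at hx
    rw [h x hx]
  have h2 : (List.range n).countP (fun k => q (n-1-k)) =
      ((List.range n).map (fun k => n-1-k)).countP q := by
    rw [List.countP_map]
    rfl
  have h3 : (List.range n).map (fun k => n-1-k) = (List.range n).reverse := by
    rw [show (List.range n).reverse = (List.range' 0 n).reverse from by rw [List.range_eq_range'],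
        List.reverse_range']
    simp
  rw [h1, h2, h3, List.countP_reverse]

theorem pvCnt_as_countP (aa : Int) (lo : Nat) : ∀ n, pvCnt aa lo n =
    (((List.range n).countP (fun k => decide (pvBit aa (lo+k) ≠ pvBit aa (lo+k+1))) : Nat) : Int) := by
  intro n
  induction n with
  | zero => simp [pvCnt]
  | succ n ih =>
    rw [List.range_succ, List.countP_append]
    show pvCnt aa lo n + _ = _
    rw [ih]
    by_cases h : pvBit aa (lo+n) ≠ pvBit aa (lo+n+1)
    · simp [h]
    · simp [h]

theorem pv_zip_eq (aa : Int) :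
    ((List.range 32).map (pvG aa)).zip (((List.range 32).map (pvG aa)).drop 1) =
    (List.range 31).map (fun k => (pvG aa k, pvG aa (k+1))) := by
  apply List.ext_getElem
  · simp
  · intro i h1 h2
    simp only [List.getElem_zip, List.getElem_drop, List.getElem_map, List.getElem_range]
    rw [Nat.add_comm 1 i]

-- one byte-chunk comparison of the string equals one byte comparison of the number
theorem pv_pair (aa : Int) (d1 d2 : Nat) (hd1 : d1 ≤ 24) (hd2 : d2 ≤ 24) :
    ((List.range 8).map (fun j => pvG aa (d1+j)) = (List.range 8).map (fun j => pvG aa (d2+j))) ↔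
    aa / 2^(24-d1) % 2^8 = aa / 2^(24-d2) % 2^8 := by
  rw [List.map_inj_left, pv_mod_eq_iff_bits]
  constructor
  · intro h j hj
    have := (pv_g_eq_iff aa (d1+(7-j)) (d2+(7-j))).1 (h (7-j) (by rw [List.mem_range]; omega))
    rw [show 31-(d1+(7-j)) = (24-d1)+j from by omega,
        show 31-(d2+(7-j)) = (24-d2)+j from by omega] at this
    rw [pv_ediv_pow_ediv_pow, pv_ediv_pow_ediv_pow]
    exact this
  · intro h t ht
    rw [List.mem_range] at ht
    apply (pv_g_eq_iff aa (d1+t) (d2+t)).2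
    have := h (7-t) (by omega)
    rw [pv_ediv_pow_ediv_pow, pv_ediv_pow_ediv_pow] at this
    rw [show 31-(d1+t) = (24-d1)+(7-t) from by omega,
        show 31-(d2+t) = (24-d2)+(7-t) from by omega]
    exact this

-- B's six-character substring search finds exactly A's six-bit windows
theorem pv_window (aa : Int) (c : Char) (v : Int)
    (hc : ∀ p : Nat, pvG aa p = c ↔ aa / 2^(31-p) % 2 = v) :
    (PySem.Chars.isIn [c,c,c,c,c,c] (((List.range 32).map (pvG aa)).drop 1) = true) ↔
    ∃ k, k < 26 ∧ ∀ u, u < 6 → aa / 2^(k+u) % 2 = v := by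
  rw [← PySem.Chars.exists_prefix_drop_iff_isIn]
  constructor
  · rintro ⟨j, hj⟩
    rw [List.drop_drop] at hj
    by_cases hj25 : j ≤ 25
    · refine ⟨25 - j, by omega, ?_⟩
      intro u hu
      rw [List.prefix_iff_eq_take] at hj
      rw [show ([c,c,c,c,c,c] : List Char).length = 6 from rfl,
          pv_chunk_take (pvG aa) 32 (1+j) 6 (by omega)] at hj
      rw [show ([c,c,c,c,c,c] : List Char) = (List.range 6).map (fun _ => c) from rfl,
          List.map_inj_left] at hj
      have := (hc (1+j+(5-u))).1 ((hj (5-u) (by rw [List.mem_range]; omega)).symm)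
      rw [show 31-(1+j+(5-u)) = (25-j)+u from by omega] at this
      exact this
    · exfalso
      have hlen := hj.length_le
      simp at hlen
      omega
  · rintro ⟨k, hk, hbits⟩
    refine ⟨25 - k, ?_⟩
    rw [List.drop_drop, List.prefix_iff_eq_take,
        show ([c,c,c,c,c,c] : List Char).length = 6 from rfl,
        pv_chunk_take (pvG aa) 32 (1+(25-k)) 6 (by omega),
        show ([c,c,c,c,c,c] : List Char) = (List.range 6).map (fun _ => c) from rfl,
        List.map_inj_left]
    intro t ht
    rw [List.mem_range] at ht
    refine ((hc _).2 ?_).symm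
    rw [show 31-(1+(25-k)+t) = k+(5-t) from by omega]
    exact hbits (5-t) (by omega)

-- B counts transitions over string positions, A over bit positions: same count
theorem pv_trans_eq (aa : Int) (n : Nat) (hn : n ≤ 31) :
    (List.range n).countP (fun k => decide (pvG aa k ≠ pvG aa (k+1))) =
    (List.range n).countP (fun k => decide (pvBit aa ((31-n)+k) ≠ pvBit aa ((31-n)+k+1))) := by
  apply pv_countP_range_reflect
  intro k hk
  have hg : (pvG aa k = pvG aa (k+1)) ↔
      (pvBit aa ((31-n)+(n-1-k)) = pvBit aa ((31-n)+(n-1-k)+1)) := by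
    rw [pv_g_eq_iff, pvBit_eq, pvBit_eq,
        show (31-n)+(n-1-k) = 31-(k+1) from by omega,
        show 31-(k+1)+1 = 31-k from by omega]
    exact eq_comm
  simp only [decide_eq_decide]
  exact not_congr hg

-- band with 63 on a shifted value is the six-bit window
theorem pv_band63 (aa : Int) (k : Nat) :
    PySem.Int.band (aa >>> k) 63 = aa / 2^k % 2^6 := by
  rw [show (63:Int) = ((2^(0+6) - 2^0 : Nat) : Int) from by norm_num,
      pv_band_chunk, Int.shiftRight_eq_div_pow,
      show (((2^k : Nat)) : Int) = (2:Int)^k from by push_cast; ring]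
  norm_num [Int.emod_one]

theorem pv_window0_iff (aa : Int) (k : Nat) :
    aa / 2^k % 2^6 = 0 ↔ ∀ u, u < 6 → aa / 2^(k+u) % 2 = 0 := by
  rw [show (0:Int) = 0 % 2^6 from by norm_num, pv_mod_eq_iff_bits]
  constructor
  · intro h u hu
    have := h u hu
    rw [pv_ediv_pow_ediv_pow] at this
    simpa using this
  · intro h u hu
    rw [pv_ediv_pow_ediv_pow]
    simpa using h u hu

theorem pv_window1_iff (aa : Int) (k : Nat) :
    aa / 2^k % 2^6 = 63 ↔ ∀ u, u < 6 → aa / 2^(k+u) % 2 = 1 := by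
  rw [show (63:Int) = (-1) % 2^6 from by decide, pv_mod_eq_iff_bits]
  constructor
  · intro h u hu
    have := h u hu
    rw [pv_ediv_pow_ediv_pow, pv_neg_one_ediv] at this
    simpa using this
  · intro h u hu
    rw [pv_ediv_pow_ediv_pow, pv_neg_one_ediv]
    simpa using h u hu

-- ===== VERDICT (by name: the statement is the Claim_ definition above) =====
theorem is_access_address_valid_spec : Claim_equal_is_access_address_valid := by
  intro aa _
  unfold Spec_is_access_address_valid is_access_address_valid is_access_address_valid_alt
  simp only []
  rw [pv_s_eq]
  -- A's byte reads become shift-then-mod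
  rw [show (4278190080:Int) = ((2^(24+8) - 2^24 : Nat) : Int) from by norm_num,
      show (16711680:Int) = ((2^(16+8) - 2^16 : Nat) : Int) from by norm_num,
      show (65280:Int) = ((2^(8+8) - 2^8 : Nat) : Int) from by norm_num,
      pv_band_shift aa 24 8, pv_band_shift aa 16 8, pv_band_shift aa 8 8]
  have hd : PySem.Int.band aa 255 = aa / 2^(0:Nat) % 2^8 := by
    rw [show (255:Int) = ((2^(0+8) - 2^0 : Nat) : Int) from by norm_num, pv_band_chunk]
    norm_num [Int.emod_one]
  rw [hd]
  -- B's slices become take/drop of the mapped range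
  rw [PySem.List.slice_from _ (by norm_num : (0:Int) ≤ 1)]
  rw [PySem.List.slice_toNat _ (by norm_num) (by norm_num),
      PySem.List.slice_toNat _ (by norm_num) (by norm_num),
      PySem.List.slice_toNat _ (by norm_num) (by norm_num),
      PySem.List.slice_toNat _ (by norm_num) (by norm_num),
      PySem.List.slice_toNat _ (by norm_num) (by norm_num),
      PySem.List.slice_toNat _ (by norm_num) (by norm_num)]
  rw [show (0:Int).toNat = 0 from rfl, show (1:Int).toNat = 1 from rfl,
      show (8:Int).toNat = 8 from rfl, show (16:Int).toNat = 16 from rfl,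
      show (24:Int).toNat = 24 from rfl, show (32:Int).toNat = 32 from rfl,
      show (6:Int).toNat = 6 from rfl, show (30:Int).toNat = 30 from rfl,
      show (8-0:Nat) = 8 from rfl]
  rw [pv_chunk_take (pvG aa) 32 0 8 (by omega),
      pv_chunk_take (pvG aa) 32 8 8 (by omega),
      pv_chunk_take (pvG aa) 32 16 8 (by omega),
      pv_chunk_take (pvG aa) 32 24 8 (by omega)]
  have hb1 := pv_pair aa 0 8 (by omega) (by omega)
  have hb2 := pv_pair aa 8 16 (by omega) (by omega)
  have hb3 := pv_pair aa 16 24 (by omega) (by omega)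
  rw [show (24-0:Nat) = 24 from rfl, show (24-8:Nat) = 16 from rfl] at hb1
  rw [show (24-8:Nat) = 16 from rfl, show (24-16:Nat) = 8 from rfl] at hb2
  rw [show (24-16:Nat) = 8 from rfl, show (24-24:Nat) = 0 from rfl] at hb3
  refine if_congr (and_congr hb1.symm (and_congr hb2.symm hb3.symm)) rfl
    (if_congr Iff.rfl rfl ?_)
  -- third stage: windows, then transitions
  rw [pv_win_eq 26 aa]
  have hwin : (PySem.Chars.isIn ['0','0','0','0','0','0'] (((List.range 32).map (pvG aa)).drop 1) ||
      PySem.Chars.isIn ['1','1','1','1','1','1'] (((List.range 32).map (pvG aa)).drop 1))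
      = ((List.range 26).any fun k =>
          decide (PySem.Int.band (aa >>> k) 63 = 0) || decide (PySem.Int.band (aa >>> k) 63 = 63)) := by
    rw [Bool.eq_iff_iff, Bool.or_eq_true, List.any_eq_true]
    constructor
    · rintro (h0 | h1)
      · obtain ⟨k, hk, hb⟩ := (pv_window aa '0' 0 (fun p => pv_g_zero_iff aa p)).1 h0
        refine ⟨k, List.mem_range.2 hk, ?_⟩
        rw [Bool.or_eq_true, decide_eq_true_eq, decide_eq_true_eq, pv_band63]
        exact Or.inl ((pv_window0_iff aa k).2 hb)
      · obtain ⟨k, hk, hb⟩ := (pv_window aa '1' 1 (fun p => pv_g_one_iff aa p)).1 h1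
        refine ⟨k, List.mem_range.2 hk, ?_⟩
        rw [Bool.or_eq_true, decide_eq_true_eq, decide_eq_true_eq, pv_band63]
        exact Or.inr ((pv_window1_iff aa k).2 hb)
    · rintro ⟨k, hk, hb⟩
      rw [List.mem_range] at hk
      rw [Bool.or_eq_true, decide_eq_true_eq, decide_eq_true_eq, pv_band63] at hb
      rcases hb with hb | hb
      · exact Or.inl ((pv_window aa '0' 0 (fun p => pv_g_zero_iff aa p)).2
          ⟨k, hk, (pv_window0_iff aa k).1 hb⟩)
      · exact Or.inr ((pv_window aa '1' 1 (fun p => pv_g_one_iff aa p)).2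
          ⟨k, hk, (pv_window1_iff aa k).1 hb⟩)
  rw [← hwin]
  cases hB : (PySem.Chars.isIn ['0','0','0','0','0','0'] (((List.range 32).map (pvG aa)).drop 1) ||
      PySem.Chars.isIn ['1','1','1','1','1','1'] (((List.range 32).map (pvG aa)).drop 1)) with
  | true => simp
  | false =>
    simp only [Bool.not_false, if_true]
    rw [if_neg (show ¬ (false = true) by simp)]
    -- A's transition loop
    rw [show (2147483648:Int) = (1:Int) <<< (31:Nat) from by decide,
        pv_bitExtract aa 31,
        show PySem.Int.band (aa >>> (31:Nat)) 1 = pvBit aa (30+1) from rfl,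
        pv_tr_eq aa 30 0, pv_ok_final aa,
        pvCnt_as_countP aa 25 6, pvCnt_as_countP aa 1 30]
    -- B's transition counts
    rw [pv_zip_eq]
    have htake : ∀ (m : Nat), m ≤ 31 →
        ((((List.range 31).map (fun k => (pvG aa k, pvG aa (k+1)))).map
            (fun p => decide (p.1 ≠ p.2))).take m).countP id =
        (List.range m).countP (fun k => decide (pvG aa k ≠ pvG aa (k+1))) := by
      intro m hm
      rw [List.map_map, ← List.map_take, List.take_range, Nat.min_eq_left hm, List.countP_map]
      apply List.countP_congr
      intro x hx
      simp
    simp only [Nat.sub_zero, List.drop_zero, htake 6 (by omega), htake 30 (by omega),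
        pv_trans_eq aa 6 (by omega), pv_trans_eq aa 30 (by omega),
        show (31:Nat) - 6 = 25 from rfl, show (31:Nat) - 30 = 1 from rfl]
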